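-- pv_equiv track=rewrite | github.com/Kingkrusha/Spellbook | spell.py | _get_excluded_ranges
-- ===== SOURCE A (Python) =====
-- from typing import List, Optional, Tuple, Dict
--
-- def _get_excluded_ranges(description: str) -> List[Tuple[int, int]]:
--     """
--     Get character ranges that should be excluded from damage dice highlighting.
--     These are sections that describe higher-level casting, etc.
--     """
--     excluded = []
--
--     # Find paragraph breaks (\\) and check what follows
--     skip_phrases = [
--         "at higher levels",
--         "when you cast this spell using",
--         "this spell's damage increases",
--         "the spell's damage increases",
--         "circle spell",
--         "cantrip upgrade",
--         "when you reach"
--     ]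
--
--     # Find all paragraph positions
--     parts = description.split("\\")
--     pos = 0
--     for i, part in enumerate(parts):
--         part_lower = part.strip().lower()
--         should_exclude = any(part_lower.startswith(phrase) for phrase in skip_phrases)
--
--         if should_exclude:
--             # Exclude this entire paragraph
--             start = pos
--             end = pos + len(part)
--             excluded.append((start, end))
--
--         pos += len(part)
--         if i < len(parts) - 1:
--             pos += 1  # Account for the \\ separator (stored as single \)
--
--     return excluded
-- ===== SOURCE B (Python) =====
-- def _get_excluded_ranges(description):
--     """One-pass scan: walk the string once, buffering the current paragraph;
--     paragraph boundaries are the '\\' characters themselves, so start/end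
--     indices fall out of the scan with no split or offset arithmetic."""
--     skip_phrases = (
--         "at higher levels",
--         "when you cast this spell using",
--         "this spell's damage increases",
--         "the spell's damage increases",
--         "circle spell",
--         "cantrip upgrade",
--         "when you reach",
--     )
--     excluded = []
--     start = 0
--     buf = []
--     for i, ch in enumerate(description):
--         if ch == "\\":
--             if "".join(buf).strip().lower().startswith(skip_phrases):
--                 excluded.append((start, i))
--             start = i + 1
--             buf = []
--         else:
--             buf.append(ch)
--     if "".join(buf).strip().lower().startswith(skip_phrases):
--         excluded.append((start, len(description)))
--     return excluded
-- ===== Notes on version B (the rewrite author's own statement) =====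
-- stated objective: alternative
-- what changed: Replaces description.split('\') with a manual running-offset counter by a single left-to-right character scan that buffers the current paragraph and emits (start, end) directly from the separator positions, with no split and no offset arithmetic.
import Mathlib
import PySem

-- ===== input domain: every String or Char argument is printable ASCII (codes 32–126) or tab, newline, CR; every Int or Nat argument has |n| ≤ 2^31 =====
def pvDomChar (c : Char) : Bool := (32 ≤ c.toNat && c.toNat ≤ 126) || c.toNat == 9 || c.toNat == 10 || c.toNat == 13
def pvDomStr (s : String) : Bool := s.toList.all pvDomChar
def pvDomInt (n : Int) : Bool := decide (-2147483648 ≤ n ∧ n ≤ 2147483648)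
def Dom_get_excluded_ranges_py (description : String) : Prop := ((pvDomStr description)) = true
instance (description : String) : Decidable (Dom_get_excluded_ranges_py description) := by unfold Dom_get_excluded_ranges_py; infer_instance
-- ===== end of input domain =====

-- B replaces split("\\") + running-offset arithmetic by a single left-to-right scan that buffers the
-- current paragraph and reads start/end straight off the separator positions (objective: alternative).

-- shared by both ports: the skip-phrase list and the per-paragraph test
-- (both Pythons compute part.strip().lower().startswith(<phrases>) verbatim)
def pvSkipPhrases : List (List Char) :=
  ["at higher levels".toList,
   "when you cast this spell using".toList,
   "this spell's damage increases".toList,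
   "the spell's damage increases".toList,
   "circle spell".toList,
   "cantrip upgrade".toList,
   "when you reach".toList]

def pvCheck (part : List Char) : Bool :=
  pvSkipPhrases.any (fun phrase =>
    PySem.Chars.startswith (PySem.Chars.lower (PySem.Chars.strip part)) phrase)

-- ===== PORT A =====
def get_excluded_ranges_py (description : String) : List (Int × Int) :=
  let parts := PySem.Chars.splitOn description.toList "\\".toList
  ((PySem.List.enumerate parts 0).foldl
    (fun (st : List (Int × Int) × Int) ip =>
      let excluded := if pvCheck ip.2 then st.1 ++ [(st.2, st.2 + (ip.2.length : Int))] else st.1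
      let pos := st.2 + (ip.2.length : Int)
      let pos := if ip.1 < (parts.length : Int) - 1 then pos + 1 else pos
      (excluded, pos)) ([], 0)).1

-- ===== PORT B =====
-- one-pass scan: i current index, start of current paragraph, buf its characters so far
def pvScan : List Char → Int → Int → List Char → List (Int × Int) → List (Int × Int)
  | [], i, start, buf, acc => if pvCheck buf then acc ++ [(start, i)] else acc
  | c :: rest, i, start, buf, acc =>
      if c = '\\' then
        pvScan rest (i + 1) (i + 1) [] (if pvCheck buf then acc ++ [(start, i)] else acc)
      else
        pvScan rest (i + 1) start (buf ++ [c]) acc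

def get_excluded_ranges_py_alt (description : String) : List (Int × Int) :=
  pvScan description.toList 0 0 [] []

-- ===== PRECONDITION & SPEC =====
def Spec_get_excluded_ranges_py (description : String) (out : List (Int × Int)) : Prop := out = get_excluded_ranges_py_alt description
instance (description : String) (out : List (Int × Int)) : Decidable (Spec_get_excluded_ranges_py description out) := by unfold Spec_get_excluded_ranges_py; infer_instance

-- ===== CLAIM (what is proved, stated in full; the proofs are below) =====
def Claim_equal_get_excluded_ranges_py : Prop := ∀ (description : String), Dom_get_excluded_ranges_py description → Spec_get_excluded_ranges_py description (get_excluded_ranges_py description)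

-- ===== LEMMAS AND PROOFS =====

-- reference single-char split, structural over the string
def splitB (b : Char) : List Char → List (List Char)
  | [] => [[]]
  | c :: cs => if c = b then [] :: splitB b cs else (splitB b cs).modifyHead (c :: ·)

-- reference recursion of A's fold, with the irrelevant last separator bump dropped
def afold : List (List Char) → Int → List (Int × Int) → List (Int × Int)
  | [], _, acc => acc
  | [p], pos, acc => if pvCheck p then acc ++ [(pos, pos + (p.length : Int))] else acc
  | p :: q :: ps, pos, acc =>
      afold (q :: ps) (pos + (p.length : Int) + 1)
        (if pvCheck p then acc ++ [(pos, pos + (p.length : Int))] else acc)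

lemma splitB_ne_nil (b : Char) (cs : List Char) : splitB b cs ≠ [] := by
  induction cs with
  | nil => simp [splitB]
  | cons c cs ih =>
    simp only [splitB]
    split
    · simp
    · cases h' : splitB b cs with
      | nil => exact absurd h' ih
      | cons q qs => simp

lemma go_spec (b : Char) (fuel : Nat) : ∀ (l cur : List Char) (acc : List (List Char)),
    l.length < fuel →
    PySem.Chars.splitOn.go [b] fuel l cur acc =
      acc.reverse ++ (splitB b l).modifyHead (fun x => cur.reverse ++ x) := by
  induction fuel with
  | zero => intro l cur acc h; omega
  | succ fuel ih =>
    intro l cur acc h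
    cases l with
    | nil =>
      rw [PySem.Chars.splitOn.go]
      · simp [splitB]
      · omega
    | cons c rest =>
      rw [PySem.Chars.splitOn.go]
      by_cases hc : b = c
      · subst hc
        have hpre : [b].isPrefixOf (b :: rest) = true := by simp [List.isPrefixOf]
        rw [if_pos hpre, ih _ _ _ (by simp at h ⊢; omega)]
        obtain ⟨q, qs, hq⟩ := List.exists_cons_of_ne_nil (splitB_ne_nil b rest)
        simp [splitB, hq]
      · have hpre : [b].isPrefixOf (c :: rest) = false := by
          simp [List.isPrefixOf]; exact hc
        rw [if_neg (by simp [hpre]), ih _ _ _ (by simp at h ⊢; omega)]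
        obtain ⟨q, qs, hq⟩ := List.exists_cons_of_ne_nil (splitB_ne_nil b rest)
        have hcb : ¬ (c = b) := fun h' => hc h'.symm
        simp [splitB, hq, hcb]

lemma splitOn_eq (b : Char) (cs : List Char) :
    PySem.Chars.splitOn cs [b] = splitB b cs := by
  unfold PySem.Chars.splitOn
  rw [go_spec b (cs.length + 1) cs [] [] (by omega)]
  obtain ⟨q, qs, hq⟩ := List.exists_cons_of_ne_nil (splitB_ne_nil b cs)
  simp [hq]

lemma enum_fold (n : Int) : ∀ (ps : List (List Char)) (s : Int) (acc : List (Int × Int)) (pos : Int),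
    s + (ps.length : Int) = n →
    ((PySem.List.enumerate ps s).foldl
      (fun (st : List (Int × Int) × Int) ip =>
        let excluded := if pvCheck ip.2 then st.1 ++ [(st.2, st.2 + (ip.2.length : Int))] else st.1
        let pos := st.2 + (ip.2.length : Int)
        let pos := if ip.1 < n - 1 then pos + 1 else pos
        (excluded, pos)) (acc, pos)).1 = afold ps pos acc := by
  intro ps
  induction ps with
  | nil => intro s acc pos _; simp [PySem.List.enumerate_nil, afold]
  | cons p ps ih =>
    intro s acc pos hn
    rw [PySem.List.enumerate_cons, List.foldl_cons]
    cases ps with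
    | nil =>
      have hlt : ¬ (s < n - 1) := by simp at hn; omega
      simp [PySem.List.enumerate_nil, afold, hlt]
    | cons q qs =>
      have hlt : s < n - 1 := by simp at hn; omega
      simp only [hlt, if_true]
      rw [ih (s + 1) _ _ (by simp at hn ⊢; omega)]
      simp [afold]

lemma scan_eq (cs : List Char) : ∀ (start : Int) (buf : List Char) (acc : List (Int × Int)),
    pvScan cs (start + (buf.length : Int)) start buf acc =
      afold ((splitB '\\' cs).modifyHead (fun x => buf ++ x)) start acc := by
  induction cs with
  | nil =>
    intro start buf acc
    simp [pvScan, splitB, afold]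
  | cons c rest ih =>
    intro start buf acc
    by_cases hc : c = '\\'
    · subst hc
      obtain ⟨q, qs, hq⟩ := List.exists_cons_of_ne_nil (splitB_ne_nil '\\' rest)
      have h2 := ih (start + (buf.length : Int) + 1) [] (if pvCheck buf then acc ++ [(start, start + (buf.length : Int))] else acc)
      simp only [List.length_nil, Nat.cast_zero, add_zero, List.nil_append, hq,
        List.modifyHead_cons] at h2
      simp only [pvScan]
      rw [h2]
      simp [splitB, hq, afold]
    · have h2 := ih start (buf ++ [c]) acc
      obtain ⟨q, qs, hq⟩ := List.exists_cons_of_ne_nil (splitB_ne_nil '\\' rest)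
      simp only [hq, List.modifyHead_cons, List.length_append, List.length_cons,
        List.length_nil, Nat.cast_add, Nat.cast_one, zero_add] at h2
      simp only [pvScan, if_neg hc]
      rw [show start + (buf.length : Int) + 1 = start + ((buf.length : Int) + 1) by ring, h2]
      simp [splitB, hc, hq]

lemma portA_eq (d : String) :
    get_excluded_ranges_py d = afold (splitB '\\' d.toList) 0 [] := by
  show ((PySem.List.enumerate (PySem.Chars.splitOn d.toList "\\".toList) 0).foldl
      (fun (st : List (Int × Int) × Int) ip =>
        let excluded := if pvCheck ip.2 then st.1 ++ [(st.2, st.2 + (ip.2.length : Int))] else st.1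
        let pos := st.2 + (ip.2.length : Int)
        let pos := if ip.1 < ((PySem.Chars.splitOn d.toList "\\".toList).length : Int) - 1 then pos + 1 else pos
        (excluded, pos)) ([], 0)).1 = afold (splitB '\\' d.toList) 0 []
  rw [show "\\".toList = ['\\'] from rfl, splitOn_eq]
  exact enum_fold _ _ 0 [] 0 (by simp)

lemma portB_eq (d : String) :
    get_excluded_ranges_py_alt d = afold (splitB '\\' d.toList) 0 [] := by
  unfold get_excluded_ranges_py_alt
  have h := scan_eq d.toList 0 [] []
  simp only [List.length_nil, Nat.cast_zero, add_zero, List.nil_append] at h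
  rw [h]
  obtain ⟨q, qs, hq⟩ := List.exists_cons_of_ne_nil (splitB_ne_nil '\\' d.toList)
  simp [hq]

-- ===== VERDICT (by name: the statement is the Claim_ definition above) =====
theorem get_excluded_ranges_py_spec : Claim_equal_get_excluded_ranges_py := by
  intro d _
  unfold Spec_get_excluded_ranges_py
  rw [portA_eq, portB_eq]
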